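-- pv_equiv track=rewrite | github.com/vumaiha/Transformer-Formal-Languages | fix_result.py | findnth
-- ===== SOURCE A (Python) =====
-- def findnth(haystack, needle, n):
--     c =1
--     for i in range(len(haystack)):
--         if c==n:
--             return i
--         if haystack[i] == needle:
--             c += 1
--     return -1
-- ===== SOURCE B (Python) =====
-- def findnth(haystack, needle, n):
--     counts = []
--     c = 0
--     for ch in haystack:
--         counts.append(c)
--         c += (ch == needle)
--     return counts.index(n - 1) if n - 1 in counts else -1
-- ===== Notes on version B (the rewrite author's own statement) =====
-- stated objective: alternative
-- what changed: replaces A's short-circuiting counting loop with early return by building the prefix match-count table in one pass and then returning list.index of n-1 in it (table-then-lookup instead of stateful scan)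
import Mathlib
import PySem

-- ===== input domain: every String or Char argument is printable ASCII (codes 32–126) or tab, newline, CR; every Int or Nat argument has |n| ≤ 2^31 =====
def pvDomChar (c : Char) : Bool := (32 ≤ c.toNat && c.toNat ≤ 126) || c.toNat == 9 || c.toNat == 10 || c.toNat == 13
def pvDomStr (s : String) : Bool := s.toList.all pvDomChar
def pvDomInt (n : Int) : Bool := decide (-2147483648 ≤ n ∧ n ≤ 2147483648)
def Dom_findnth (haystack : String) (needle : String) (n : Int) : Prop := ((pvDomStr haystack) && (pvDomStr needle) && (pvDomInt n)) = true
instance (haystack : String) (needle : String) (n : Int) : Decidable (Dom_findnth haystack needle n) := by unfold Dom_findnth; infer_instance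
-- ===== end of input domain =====

-- B replaces A's counting loop with early return by a prefix-match-count table plus a list.index lookup; alternative decomposition, same cost.

-- ===== PORT A =====
-- the for-loop over range(len(haystack)) with counter c, checking haystack[i] == needle
def findnthGo (needle : String) (n : Int) : List Char → Int → Nat → Int
  | [], _, _ => -1
  | ch :: rest, c, i =>
    if c = n then (i : Int)
    else findnthGo needle n rest (if String.ofList [ch] = needle then c + 1 else c) (i + 1)

def findnth (haystack : String) (needle : String) (n : Int) : Int :=
  findnthGo needle n haystack.toList 1 0

-- ===== PORT B =====
-- the loop 'for ch in haystack: counts.append(c); c += (ch == needle)'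
def prefixCountsB (needle : String) : List Char → Int → List Int
  | [], _ => []
  | ch :: rest, c =>
    c :: prefixCountsB needle rest (c + (if String.ofList [ch] = needle then 1 else 0))

-- 'counts.index(n - 1) if n - 1 in counts else -1'
def findnth_alt (haystack : String) (needle : String) (n : Int) : Int :=
  let counts := prefixCountsB needle haystack.toList 0
  if (n - 1) ∈ counts then
    match PySem.List.index? counts (n - 1) with
    | some j => (j : Int)
    | none => -1          -- unreachable: guarded by the membership test
  else -1

-- ===== PRECONDITION & SPEC =====
def Spec_findnth (haystack : String) (needle : String) (n : Int) (out : Int) : Prop := out = findnth_alt haystack needle n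
instance (haystack : String) (needle : String) (n : Int) (out : Int) : Decidable (Spec_findnth haystack needle n out) := by unfold Spec_findnth; infer_instance

-- ===== CLAIM =====
def Claim_equal_findnth : Prop := ∀ (haystack : String) (needle : String) (n : Int), Dom_findnth haystack needle n → Spec_findnth haystack needle n (findnth haystack needle n)

-- ===== LEMMAS AND PROOFS =====

-- A's loop with counter c+1 is B's first-index search for n-1 in the prefix-count table starting at c
theorem findnthGo_eq_index (needle : String) (n : Int) (cs : List Char) :
    ∀ (c : Int) (i : Nat),
      findnthGo needle n cs (c + 1) i =
        match PySem.List.index? (prefixCountsB needle cs c) (n - 1) with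
        | some j => ((i + j : Nat) : Int)
        | none => -1 := by
  induction cs with
  | nil => intro c i; rfl
  | cons ch rest ih =>
    intro c i
    by_cases hm : String.ofList [ch] = needle
    all_goals simp only [findnthGo, prefixCountsB, hm, ite_true, ite_false, add_zero]
    all_goals by_cases hc : c = n - 1
    · rw [if_pos (by omega), hc, PySem.List.index?_cons_self]; simp
    · rw [if_neg (by omega), PySem.List.index?_cons_of_ne _ (by omega),
        show c + 1 + 1 = (c + 1) + 1 from rfl, ih (c + 1) (i + 1)]
      cases PySem.List.index? (prefixCountsB needle rest (c + 1)) (n - 1) with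
      | none => rfl
      | some j => simp only [Option.map]; congr 1; omega
    · rw [if_pos (by omega), hc, PySem.List.index?_cons_self]; simp
    · rw [if_neg (by omega), PySem.List.index?_cons_of_ne _ (by omega), ih c (i + 1)]
      cases PySem.List.index? (prefixCountsB needle rest c) (n - 1) with
      | none => rfl
      | some j => simp only [Option.map]; congr 1; omega

-- ===== VERDICT =====
theorem findnth_spec : Claim_equal_findnth := by
  intro haystack needle n _
  unfold Spec_findnth findnth findnth_alt
  have key := findnthGo_eq_index needle n haystack.toList 0 0
  simp only [zero_add] at key
  rw [key]
  by_cases hm : (n - 1) ∈ prefixCountsB needle haystack.toList 0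
  · obtain ⟨j, hj⟩ := Option.isSome_iff_exists.mp
      ((PySem.List.index?_isSome_iff _ _).mpr hm)
    rw [hj]
    simp only [PySem.List.index?_eq_idxOf?] at hj
    simp [hm, hj]
  · rw [(PySem.List.index?_eq_none_iff _ _).mpr hm]
    simp [hm]
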